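-- pv_equiv track=rewrite | github.com/liuyanglxh/python-comprehensive | util/csv_util.py | __get_dirs
-- ===== SOURCE A (Python) =====
-- def __get_dirs(path: str) -> list:
-- 	"""
-- 	提取文件的文件夹，默认把最后一个/后面的当做文件名
-- 	:param path:
-- 	:return:
-- 	"""
-- 	splits = path.split("/")
-- 	cur_dir, lst = '', []
-- 	for index in range(0, len(splits) - 1):
-- 		split = splits[index]
-- 		if not split: continue
-- 		cur_dir = cur_dir + "/" + split
-- 		lst.append(cur_dir)
-- 	return lst
-- ===== SOURCE B (Python) =====
-- def __get_dirs(path: str) -> list: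
--     parts = [s for s in path.split("/")[:-1] if s]
--     return ["/" + "/".join(parts[:i + 1]) for i in range(len(parts))]
-- ===== Notes on version B (the rewrite author's own statement) =====
-- stated objective: simpler
-- what changed: Replaces the single loop that threads a running cur_dir accumulator with two passes: first materialize the list of non-empty path components before the final separator, then rebuild each directory prefix independently by joining a growing slice of that component list.
import Mathlib
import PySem

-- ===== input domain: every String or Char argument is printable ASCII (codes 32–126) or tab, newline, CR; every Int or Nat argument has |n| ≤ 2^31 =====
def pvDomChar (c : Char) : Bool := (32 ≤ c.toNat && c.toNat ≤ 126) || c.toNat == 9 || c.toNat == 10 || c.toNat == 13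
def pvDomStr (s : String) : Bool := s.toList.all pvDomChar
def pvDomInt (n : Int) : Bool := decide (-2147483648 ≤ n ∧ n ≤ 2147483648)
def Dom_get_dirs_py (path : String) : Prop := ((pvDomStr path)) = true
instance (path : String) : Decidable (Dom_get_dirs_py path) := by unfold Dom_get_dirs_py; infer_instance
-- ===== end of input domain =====

-- B rebuilds each prefix by joining a growing slice of the filtered component table instead of
-- threading A's running cur_dir accumulator through one loop (objective: simpler decomposition).

-- ===== PORT A =====
-- path.split("/") → PySem.Str.split?; the separator "/" is non-empty, so split? is always `some`
-- and `.getD []` is exact. splits[index] for index in range(0, len(splits)-1) is always in range,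
-- so pyGetD with default "" is exact.
def get_dirs_py (path : String) : List String :=
  let splits := (PySem.Str.split? path "/").getD []
  let st := (PySem.List.pyRange 0 ((splits.length : Int) - 1) 1).foldl
    (fun (st : String × List String) index =>
      let split := PySem.List.pyGetD splits index ""
      if split = "" then st
      else
        let cur_dir := st.1 ++ "/" ++ split
        (cur_dir, st.2 ++ [cur_dir]))
    ("", [])
  st.2

-- ===== PORT B =====
-- parts = [s for s in path.split("/")[:-1] if s]
-- return ["/" + "/".join(parts[:i+1]) for i in range(len(parts))]
def get_dirs_py_alt (path : String) : List String :=
  let parts := (PySem.List.slice ((PySem.Str.split? path "/").getD []) none (some (-1))).filter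
    (fun s => s ≠ "")
  (PySem.List.pyRange 0 (parts.length : Int) 1).map
    (fun i => "/" ++ PySem.Str.join "/" (PySem.List.slice parts none (some (i + 1))))

-- ===== PRECONDITION & SPEC =====
def Spec_get_dirs_py (path : String) (out : List String) : Prop := out = get_dirs_py_alt path
instance (path : String) (out : List String) : Decidable (Spec_get_dirs_py path out) := by unfold Spec_get_dirs_py; infer_instance

-- ===== CLAIM (what is proved, stated in full; the proofs are below) =====
def Claim_equal_get_dirs_py : Prop := ∀ (path : String), Dom_get_dirs_py path → Spec_get_dirs_py path (get_dirs_py path)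

-- ===== LEMMAS AND PROOFS =====

-- split never yields an empty list of pieces
lemma splitOn_go_ne_nil : ∀ (fuel : Nat) (sep l cur : List Char) (acc : List (List Char)),
    PySem.Chars.splitOn.go sep fuel l cur acc ≠ [] := by
  intro fuel
  induction fuel with
  | zero => intro sep l cur acc; rw [PySem.Chars.splitOn.go]; simp
  | succ n ih =>
    intro sep l cur acc
    cases l with
    | nil => rw [PySem.Chars.splitOn.go]; simp; omega
    | cons c rest =>
      rw [PySem.Chars.splitOn.go]
      split <;> exact ih _ _ _ _

lemma split_ne_nil (path : String) : (PySem.Str.split? path "/").getD [] ≠ [] := by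
  simp [PySem.Str.split?, PySem.Chars.split?, PySem.Chars.splitOn]
  exact splitOn_go_ne_nil _ _ _ _ _

-- the directory prefixes of a list of (non-empty) components, below the running prefix `cur`
def dirPrefixes (cur : String) : List String → List String
  | [] => []
  | x :: t => (cur ++ "/" ++ x) :: dirPrefixes (cur ++ "/" ++ x) t

-- A's loop computes dirPrefixes
lemma foldl_eq_dirPrefixes : ∀ (parts : List String) (cur : String) (acc : List String),
    (parts.foldl (fun (st : String × List String) x =>
        (st.1 ++ "/" ++ x, st.2 ++ [st.1 ++ "/" ++ x])) (cur, acc)).2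
      = acc ++ dirPrefixes cur parts := by
  intro parts
  induction parts with
  | nil => intro cur acc; simp [dirPrefixes]
  | cons x t ih => intro cur acc; simp [dirPrefixes, List.foldl_cons, ih]

-- Str.join distributes over a cons of two or more pieces
lemma str_join_cons_cons (x q : String) (rest : List String) :
    PySem.Str.join "/" (x :: q :: rest) = x ++ "/" ++ PySem.Str.join "/" (q :: rest) := by
  show String.ofList (PySem.Chars.join "/".toList (List.map String.toList (x :: q :: rest))) = _
  rw [List.map_cons, List.map_cons, PySem.Chars.join_cons_cons, String.ofList_append, String.ofList_append,
    String.ofList_toList, String.ofList_toList]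
  rfl

lemma str_join_singleton (x : String) : PySem.Str.join "/" [x] = x := by
  simp [PySem.Str.join, PySem.Chars.join_singleton]

-- B's slice-join comprehension computes dirPrefixes
lemma map_join_eq_dirPrefixes : ∀ (parts : List String) (cur : String),
    (List.range parts.length).map
        (fun k => cur ++ "/" ++ PySem.Str.join "/" (parts.take (k + 1)))
      = dirPrefixes cur parts := by
  intro parts
  induction parts with
  | nil => intro cur; simp [dirPrefixes]
  | cons x t ih =>
    intro cur
    rw [List.length_cons, List.range_succ_eq_map, List.map_cons, List.map_map]
    simp only [List.take_succ_cons, List.take_zero, str_join_singleton, dirPrefixes]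
    congr 1
    rw [← ih (cur ++ "/" ++ x)]
    apply List.map_congr_left
    intro k hk
    simp only [Function.comp_apply, List.mem_range] at *
    have htake : t.take (k + 1) ≠ [] := by
      simp only [ne_eq, List.take_eq_nil_iff]
      push Not
      exact ⟨by omega, by rintro rfl; simp at hk⟩
    obtain ⟨q, rest, hqr⟩ := List.exists_cons_of_ne_nil htake
    rw [hqr, str_join_cons_cons]
    simp [String.append_assoc]

-- dropLast getD agrees with the full list inside range
lemma getD_dropLast {α : Type} (xs : List α) (k : Nat) (d : α) (hk : k < xs.length - 1) :
    xs.dropLast.getD k d = xs.getD k d := by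
  rw [List.getD_eq_getElem?_getD, List.getD_eq_getElem?_getD, List.getElem?_dropLast, if_pos hk]

-- A's indexed loop is the accumulator fold over the filtered dropLast
lemma get_dirs_py_eq_fold (path : String) :
    get_dirs_py path
      = ((((PySem.Str.split? path "/").getD []).dropLast.filter (fun s => s ≠ "")).foldl
          (fun (st : String × List String) x =>
            (st.1 ++ "/" ++ x, st.2 ++ [st.1 ++ "/" ++ x])) ("", [])).2 := by
  unfold get_dirs_py
  set splits := (PySem.Str.split? path "/").getD [] with hs
  have hne : splits ≠ [] := split_ne_nil path
  have hlen : ((splits.length : Int) - 1) = (splits.dropLast.length : Int) := by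
    have : 1 ≤ splits.length := List.length_pos_of_ne_nil hne
    simp [List.length_dropLast]
    omega
  simp only [hlen]
  rw [PySem.List.foldl_congr_mem (PySem.List.pyRange 0 (splits.dropLast.length : Int) 1)
      _ (fun (st : String × List String) index =>
          let split := PySem.List.pyGetD splits.dropLast index ""
          if split = "" then st
          else (st.1 ++ "/" ++ split, st.2 ++ [st.1 ++ "/" ++ split])) ("", []) ?_]
  · rw [PySem.List.foldl_pyRange_pyGetD' splits.dropLast ""
        (fun (st : String × List String) split =>
          if split = "" then st
          else (st.1 ++ "/" ++ split, st.2 ++ [st.1 ++ "/" ++ split])) ("", []) le_rfl]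
    simp only [Int.toNat_zero, List.drop_zero]
    rw [PySem.List.foldl_congr_mem _ _
        (fun (st : String × List String) x =>
          if (fun s => decide (s ≠ "")) x = true
          then (st.1 ++ "/" ++ x, st.2 ++ [st.1 ++ "/" ++ x]) else st) ("", []) ?_]
    · rw [PySem.List.foldl_if_eq_foldl_filter]
    · intro acc x _
      by_cases hx : x = "" <;> simp [hx]
  · intro acc j hj
    rw [PySem.List.mem_pyRange_one] at hj
    have h1 : PySem.List.pyGetD splits j "" = PySem.List.pyGetD splits.dropLast j "" := by
      rw [PySem.List.pyGetD_of_nonneg _ _ hj.1, PySem.List.pyGetD_of_nonneg _ _ hj.1]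
      rw [getD_dropLast]
      have hlt : j < (splits.dropLast.length : Int) := hj.2
      have : j.toNat < splits.dropLast.length := by omega
      simpa [List.length_dropLast] using this
    simp only [h1]

-- B unfolded to take/join over the same filtered dropLast
lemma get_dirs_py_alt_eq (path : String) :
    get_dirs_py_alt path
      = (List.range ((((PySem.Str.split? path "/").getD []).dropLast.filter
            (fun s => s ≠ "")).length)).map
          (fun k => "/" ++ PySem.Str.join "/"
            (((((PySem.Str.split? path "/").getD []).dropLast.filter
              (fun s => s ≠ "")).take (k + 1)))) := by
  unfold get_dirs_py_alt
  simp only [PySem.List.slice_to_neg_one, PySem.List.pyRange_zero_nat, List.map_map]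
  apply List.map_congr_left
  intro k hk
  simp only [Function.comp_apply]
  rw [PySem.List.slice_to _ (by omega : (0:Int) ≤ (k : Int) + 1)]
  have h1 : ((k : Int) + 1).toNat = k + 1 := by omega
  rw [h1]

-- ===== VERDICT (by name: the statement is the Claim_ definition above) =====
theorem get_dirs_py_spec : Claim_equal_get_dirs_py := by
  intro path _
  unfold Spec_get_dirs_py
  rw [get_dirs_py_eq_fold, get_dirs_py_alt_eq]
  set parts := (((PySem.Str.split? path "/").getD []).dropLast.filter (fun s => s ≠ ""))
  rw [foldl_eq_dirPrefixes, List.nil_append]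
  rw [← map_join_eq_dirPrefixes parts ""]
  apply List.map_congr_left
  intro k hk
  simp
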